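-- pv_equiv track=rewrite | github.com/openstack-charmers/release-tools | lp-builder-config/charm_project.py | _group_channels
-- ===== SOURCE A (Python) =====
-- import collections
-- from typing import (Any, Dict, Iterator, List, Tuple, Optional)
--
-- def _group_channels(channels: List[str],
--                     ) -> List[Tuple[str, List[str]]]:
--     """Group channels into compatible lists.
--
--     The charmhub appears to only allow a recipe to target a single channel,
--     but with multiple levels of risk and/or 'branches'.  The specs for
--     channels are either 'latest' or 'latest/<risk>'.  In this case, the
--     grouping would be
--     [('latest', ['latest', 'latest/edge', 'latest/stable']),]
--
--     :param channels: a list of channels to target in the charmhub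
--     :returns: the channels, grouped by track.
--     """
--     groups = collections.OrderedDict()
--     for channel in channels:
--         if '/' in channel:
--             group, _ = channel.split('/', 1)
--         else:
--             group = channel
--         try:
--             groups[group].append(channel)
--         except KeyError:
--             groups[group] = [channel]
--     return list(groups.items())
-- ===== SOURCE B (Python) =====
-- def _group_channels(channels):
--     def _track(c):
--         return c.split('/', 1)[0] if '/' in c else c
--     tracks = list(dict.fromkeys(_track(c) for c in channels))
--     return [(t, [c for c in channels if _track(c) == t]) for t in tracks]
-- ===== Notes on version B (the rewrite author's own statement) =====
-- stated objective: alternative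
-- what changed: Replaces the single accumulating OrderedDict pass with a distinct-tracks pass (dict.fromkeys) followed by a per-track filtering comprehension.
import Mathlib
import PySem

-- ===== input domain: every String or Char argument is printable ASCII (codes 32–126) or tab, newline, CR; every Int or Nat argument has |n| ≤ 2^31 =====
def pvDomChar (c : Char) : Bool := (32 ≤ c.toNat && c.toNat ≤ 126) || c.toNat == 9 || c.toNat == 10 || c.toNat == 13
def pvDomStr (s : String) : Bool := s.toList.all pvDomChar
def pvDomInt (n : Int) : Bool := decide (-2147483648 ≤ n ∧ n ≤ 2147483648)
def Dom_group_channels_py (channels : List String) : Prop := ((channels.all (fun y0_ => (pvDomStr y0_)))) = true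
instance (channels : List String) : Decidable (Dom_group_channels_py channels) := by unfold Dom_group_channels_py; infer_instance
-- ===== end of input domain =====

-- B replaces A's single accumulating OrderedDict pass by a distinct-tracks pass followed by
-- per-track filtering passes (alternative decomposition, same results).


-- track of a channel: the prefix before the first '/', else the whole string
-- (A computes this inline in its loop; B's _track helper is the same expression)
def pvTrack (c : String) : String :=
  if PySem.Str.isIn "/" c then
    match PySem.Str.splitMax? c "/" 1 with
    | some (g :: _) => g
    | _ => c
  else c

-- ===== PORT A =====
def group_channels_py (channels : List String) : List (String × List String) :=
  (channels.foldl
    (fun groups channel =>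
      let group := pvTrack channel
      match groups.get? group with
      | some l => groups.insert group (l ++ [channel])
      | none => groups.insert group [channel])
    PySem.Dict.empty).items

-- ===== PORT B =====
def group_channels_py_alt (channels : List String) : List (String × List String) :=
  let tracks := PySem.List.dedup (channels.map pvTrack)
  tracks.map (fun t => (t, channels.filter (fun c => pvTrack c == t)))

-- ===== PRECONDITION & SPEC =====
def Spec_group_channels_py (channels : List String) (out : List (String × List String)) : Prop := out = group_channels_py_alt channels
instance (channels : List String) (out : List (String × List String)) : Decidable (Spec_group_channels_py channels out) := by unfold Spec_group_channels_py; infer_instance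

-- ===== CLAIM (what is proved, stated in full; the proofs are below) =====
def Claim_equal_group_channels_py : Prop := ∀ (channels : List String), Dom_group_channels_py channels → Spec_group_channels_py channels (group_channels_py channels)

-- ===== LEMMAS AND PROOFS =====

-- A's loop body is exactly a modify with default []
theorem pvStep_eq_modify (d : PySem.Dict String (List String)) (ch : String) :
    (let group := pvTrack ch
     match d.get? group with
     | some l => d.insert group (l ++ [ch])
     | none => d.insert group [ch]) =
    d.modify (pvTrack ch) [] (· ++ [ch]) := by
  simp only [PySem.Dict.modify, PySem.Dict.getD_eq_get?_getD]
  cases h : d.get? (pvTrack ch) <;> simp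

theorem group_channels_fold_eq (channels : List String) :
    channels.foldl
      (fun groups channel =>
        let group := pvTrack channel
        match groups.get? group with
        | some l => groups.insert group (l ++ [channel])
        | none => groups.insert group [channel])
      PySem.Dict.empty =
    (channels.map (fun c => (pvTrack c, c))).foldl
      (fun d p => d.modify p.1 [] (· ++ [p.2])) PySem.Dict.empty := by
  rw [List.foldl_map]
  apply PySem.List.foldl_congr_mem
  intro d ch _
  exact pvStep_eq_modify d ch

-- ===== VERDICT (by name: the statement is the Claim_ definition above) =====
theorem group_channels_py_spec : Claim_equal_group_channels_py := by
  intro channels _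
  unfold Spec_group_channels_py group_channels_py group_channels_py_alt
  rw [group_channels_fold_eq]
  set D := (channels.map (fun c => (pvTrack c, c))).foldl
      (fun d p => d.modify p.1 [] (· ++ [p.2])) PySem.Dict.empty with hD
  have hnd : D.keys.Nodup := by
    rw [hD]
    exact PySem.Dict.nodup_keys_foldl_modify_key _ Prod.fst [] (fun _ p => (· ++ [p.2])) _ PySem.Dict.nodup_keys_empty
  have hkeys : D.keys = PySem.List.dedup (channels.map pvTrack) := by
    rw [hD, PySem.Dict.keys_foldl_modify_key]
    simp [PySem.Set.update_nil_left, List.map_map, Function.comp_def]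
  rw [PySem.Dict.items_eq_map_keys D hnd [], hkeys]
  refine List.map_congr_left (fun t ht => ?_)
  rw [hD, PySem.Dict.getD_foldl_modify_append]
  simp [List.filter_map, List.map_map, Function.comp_def]
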